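-- pv_equiv track=rewrite | github.com/ngothilinh20187179/Data-Structure-and-Algorithm | Data Structures/advanced data structure (non-linear)/tree/max_heap.py | stream_max
-- ===== SOURCE A (Python) =====
-- class MaxHeap:
--     def __init__(self):
--         self.heap = []
--
--     def _left_child(self, index):
--         return 2 * index + 1
--
--     def _right_child(self, index):
--         return 2 * index + 2
--
--     def _parent(self, index):
--         return (index - 1) // 2
--
--     def _swap(self, index1, index2):
--         self.heap[index1], self.heap[index2] = self.heap[index2], self.heap[index1]
--
--     def insert(self, value):
--         # add node to last array, find father, compare, swap
--         self.heap.append(value)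
--         current_node_index = len(self.heap) - 1
--         while current_node_index > 0 and self.heap[current_node_index] > self.heap[self._parent(current_node_index)]:
--             self._swap(current_node_index, self._parent(current_node_index))
--             current_node_index = self._parent(current_node_index)
--
--     # restores the heap property when it's been violated
--     def _sink_down(self, index):
--         max_index = index
--         while True:
--             left_index = self._left_child(index)
--             right_index = self._right_child(index)
--
--             if (left_index < len(self.heap) and
--                     self.heap[left_index] > self.heap[max_index]):
--                 max_index = left_index
--
--             if (right_index < len(self.heap) and
--                     self.heap[right_index] > self.heap[max_index]):
--                 max_index = right_index
--
--             if max_index != index: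
--                 self._swap(index, max_index)
--                 index = max_index
--             else:
--                 return
--
--     def remove(self):
--         if len(self.heap) == 0:
--             return None
--         if len(self.heap) == 1:
--             return self.heap.pop()
--         # replace root node - last node, sink down
--         maxNode = self.heap[0]
--         self.heap[0] = self.heap.pop()
--         self._sink_down(0)
--         return maxNode
--
-- def stream_max(nums):
--     max_values = []
--     max_heap = MaxHeap()
--
--     for num in nums:
--         max_heap.insert(num)
--         root_heap = max_heap.heap[0]
--         max_values.append(root_heap)
--
--     return max_values
-- ===== SOURCE B (Python) =====
-- def stream_max(nums):
--     max_values = []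
--     for i in range(len(nums)):
--         best = nums[0]
--         for j in range(1, i + 1):
--             if nums[j] > best:
--                 best = nums[j]
--         max_values.append(best)
--     return max_values
-- ===== Notes on version B (the rewrite author's own statement) =====
-- stated objective: simpler
-- what changed: Replaced the incremental max-heap (bubble-up insert, reading the root each step) by a plain nested loop that rescans each prefix nums[0..i] afresh for its maximum.
import Mathlib
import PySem

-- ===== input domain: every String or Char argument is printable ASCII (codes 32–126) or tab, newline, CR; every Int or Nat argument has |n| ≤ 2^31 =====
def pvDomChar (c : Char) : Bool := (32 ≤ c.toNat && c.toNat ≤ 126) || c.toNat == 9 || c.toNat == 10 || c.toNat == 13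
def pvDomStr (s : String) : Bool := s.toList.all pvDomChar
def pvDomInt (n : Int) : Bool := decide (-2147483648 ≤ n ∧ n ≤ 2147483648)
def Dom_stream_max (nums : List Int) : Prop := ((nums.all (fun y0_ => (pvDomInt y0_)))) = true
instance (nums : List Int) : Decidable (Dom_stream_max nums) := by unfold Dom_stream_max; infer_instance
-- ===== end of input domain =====

-- B replaces A's incremental max-heap by a plain nested rescan of each prefix (simpler, no structure maintained).

-- ===== PORT A =====
-- MaxHeap._swap: heap[i], heap[j] = heap[j], heap[i].  Indices produced by the
-- algorithm are always in range, so List.set / List.getD are exact here.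
def pvSwap (h : List Int) (i j : Nat) : List Int :=
  (h.set i (h.getD j 0)).set j (h.getD i 0)

-- MaxHeap.insert's while loop; parent = (i-1)//2 equals Nat division since i > 0.
def pvBubbleUp (h : List Int) (i : Nat) : List Int :=
  if _hc : 0 < i ∧ h.getD i 0 > h.getD ((i - 1) / 2) 0 then
    pvBubbleUp (pvSwap h i ((i - 1) / 2)) ((i - 1) / 2)
  else h
termination_by i
decreasing_by omega

-- MaxHeap.insert: append, then bubble up from the last index (= old length).
def pvInsert (h : List Int) (v : Int) : List Int :=
  pvBubbleUp (h ++ [v]) h.length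

-- body of the for-loop in stream_max: insert num, append heap[0]
def pvStep (st : List Int × List Int) (num : Int) : List Int × List Int :=
  let h := pvInsert st.1 num
  (h, st.2 ++ [h.getD 0 0])

def stream_max (nums : List Int) : List Int :=
  (nums.foldl pvStep (([] : List Int), ([] : List Int))).2

-- ===== PORT B =====
-- for i in range(len(nums)): best = nums[0]; for j in range(1, i+1): …
def stream_max_alt (nums : List Int) : List Int :=
  (List.range nums.length).map (fun i =>
    (List.range' 1 i).foldl
      (fun best j => if nums.getD j 0 > best then nums.getD j 0 else best)
      (nums.getD 0 0))

-- ===== PRECONDITION & SPEC =====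
def Spec_stream_max (nums : List Int) (out : List Int) : Prop := out = stream_max_alt nums
instance (nums : List Int) (out : List Int) : Decidable (Spec_stream_max nums out) := by unfold Spec_stream_max; infer_instance

-- ===== CLAIM (what is proved, stated in full; the proofs are below) =====
def Claim_equal_stream_max : Prop := ∀ (nums : List Int), Dom_stream_max nums → Spec_stream_max nums (stream_max nums)

-- ===== LEMMAS AND PROOFS =====

-- running maxima of l continued from current maximum m (shared spec of both sides)
def pvScan (m : Int) (l : List Int) : List Int :=
  match l with
  | [] => []
  | y :: ys => max m y :: pvScan (max m y) ys

lemma pvSwap_length (h : List Int) (i j : Nat) : (pvSwap h i j).length = h.length := by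
  simp [pvSwap]

lemma pvBubbleUp_length (h : List Int) (i : Nat) : (pvBubbleUp h i).length = h.length := by
  fun_induction pvBubbleUp h i with
  | case1 h i hc ih => rw [ih, pvSwap_length]
  | case2 => rfl

lemma pvGetD_set (l : List Int) (i k : Nat) (a : Int) :
    (l.set i a).getD k 0 = if i = k ∧ i < l.length then a else l.getD k 0 := by
  simp only [List.getD_eq_getElem?_getD, List.getElem?_set]
  split_ifs with h1 h2 h3 h3 <;> simp_all
  omega

lemma pvSwap_getD (h : List Int) (i j k : Nat) (hi : i < h.length) (hj : j < h.length) :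
    (pvSwap h i j).getD k 0 =
      if j = k then h.getD i 0 else if i = k then h.getD j 0 else h.getD k 0 := by
  simp only [pvSwap, pvGetD_set, List.length_set]
  split_ifs <;> simp_all

-- core invariant: if the root dominates every slot except possibly i, bubbling up
-- from i yields root = max(old root, h[i]) and a root dominating every slot
lemma pvBubbleUp_root (h : List Int) (i : Nat) (hi : i < h.length)
    (hdom : ∀ j, j < h.length → j ≠ i → h.getD j 0 ≤ h.getD 0 0) :
    (pvBubbleUp h i).getD 0 0 = max (h.getD 0 0) (h.getD i 0) ∧
    (∀ j, j < h.length → (pvBubbleUp h i).getD j 0 ≤ (pvBubbleUp h i).getD 0 0) := by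
  fun_induction pvBubbleUp h i with
  | case1 h i hc ih =>
    obtain ⟨hpos, hgt⟩ := hc
    have hp : (i - 1) / 2 < h.length := by omega
    have hpi : (i - 1) / 2 ≠ i := by omega
    have hlen : (pvSwap h i ((i - 1) / 2)).length = h.length := pvSwap_length ..
    have hi0 : i ≠ 0 := by omega
    have hget : ∀ k, (pvSwap h i ((i - 1) / 2)).getD k 0 =
        if (i - 1) / 2 = k then h.getD i 0 else if i = k then h.getD ((i - 1) / 2) 0
        else h.getD k 0 := fun k => pvSwap_getD h i _ k hi hp
    have hi' : (i - 1) / 2 < (pvSwap h i ((i - 1) / 2)).length := by omega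
    by_cases hp0 : (i - 1) / 2 = 0
    · -- parent is the root: the new value becomes the root
      have hroot : (pvSwap h i ((i - 1) / 2)).getD 0 0 = h.getD i 0 := by
        rw [hget 0, if_pos hp0]
      have hRlt : h.getD 0 0 < h.getD i 0 := by rw [← hp0]; exact hgt
      have hdom' : ∀ j, j < (pvSwap h i ((i - 1) / 2)).length → j ≠ (i - 1) / 2 →
          (pvSwap h i ((i - 1) / 2)).getD j 0 ≤ (pvSwap h i ((i - 1) / 2)).getD 0 0 := by
        intro j hjl hjne
        rw [hlen] at hjl
        rw [hget j, hroot]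
        split_ifs with e1 e2
        · exact le_refl _
        · rw [hp0]; exact le_of_lt hRlt
        · exact le_of_lt (lt_of_le_of_lt (hdom j hjl (fun e => e2 e.symm)) hRlt)
      obtain ⟨ih1, ih2⟩ := ih hi' hdom'
      constructor
      · rw [ih1, hroot, hget ((i - 1) / 2), if_pos rfl, max_self,
          max_eq_right (le_of_lt hRlt)]
      · intro j hjl
        exact ih2 j (by omega)
    · -- parent is not the root: the root is unchanged by the swap
      have hroot : (pvSwap h i ((i - 1) / 2)).getD 0 0 = h.getD 0 0 := by
        rw [hget 0, if_neg hp0, if_neg hi0]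
      have hparent : (pvSwap h i ((i - 1) / 2)).getD ((i - 1) / 2) 0 = h.getD i 0 := by
        rw [hget ((i - 1) / 2), if_pos rfl]
      have hdom' : ∀ j, j < (pvSwap h i ((i - 1) / 2)).length → j ≠ (i - 1) / 2 →
          (pvSwap h i ((i - 1) / 2)).getD j 0 ≤ (pvSwap h i ((i - 1) / 2)).getD 0 0 := by
        intro j hjl hjne
        rw [hlen] at hjl
        rw [hget j, hroot]
        split_ifs with e1 e2
        · exact absurd e1.symm hjne
        · exact hdom _ hp hpi
        · exact hdom j hjl (fun e => e2 e.symm)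
      obtain ⟨ih1, ih2⟩ := ih hi' hdom'
      constructor
      · rw [ih1, hroot, hparent]
      · intro j hjl
        exact ih2 j (by omega)
  | case2 h i hc =>
    by_cases hi0 : i = 0
    · subst hi0
      refine ⟨(max_self _).symm, ?_⟩
      intro j hjl
      by_cases hj0 : j = 0
      · simp [hj0]
      · exact hdom j hjl hj0
    · have hngt : ¬ h.getD i 0 > h.getD ((i - 1) / 2) 0 := by
        intro hgt; exact hc ⟨by omega, hgt⟩
      have hp : (i - 1) / 2 < h.length := by omega
      have h1 : h.getD i 0 ≤ h.getD ((i - 1) / 2) 0 := not_lt.mp hngt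
      have h2 : h.getD ((i - 1) / 2) 0 ≤ h.getD 0 0 := by
        by_cases hp0 : (i - 1) / 2 = 0
        · rw [hp0]
        · exact hdom _ hp (by omega)
      have hle : h.getD i 0 ≤ h.getD 0 0 := le_trans h1 h2
      refine ⟨(max_eq_left hle).symm, ?_⟩
      intro j hjl
      by_cases hj0 : j = 0
      · simp [hj0]
      by_cases hji : j = i
      · subst hji; exact hle
      · exact hdom j hjl hji

lemma pvAppend_getD_last (h : List Int) (v : Int) : (h ++ [v]).getD h.length 0 = v := by
  simp [List.getD_eq_getElem?_getD]

lemma pvAppend_getD_lt (h : List Int) (v : Int) (j : Nat) (hj : j < h.length) :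
    (h ++ [v]).getD j 0 = h.getD j 0 := by
  simp [List.getD_eq_getElem?_getD, List.getElem?_append_left hj]

lemma pvInsert_spec (h : List Int) (v : Int) (hne : 0 < h.length)
    (hdom : ∀ j, j < h.length → h.getD j 0 ≤ h.getD 0 0) :
    (pvInsert h v).getD 0 0 = max (h.getD 0 0) v ∧
    0 < (pvInsert h v).length ∧
    (∀ j, j < (pvInsert h v).length → (pvInsert h v).getD j 0 ≤ (pvInsert h v).getD 0 0) := by
  have hlen : (h ++ [v]).length = h.length + 1 := by simp
  have hi : h.length < (h ++ [v]).length := by omega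
  have hdom' : ∀ j, j < (h ++ [v]).length → j ≠ h.length →
      (h ++ [v]).getD j 0 ≤ (h ++ [v]).getD 0 0 := by
    intro j hjl hjne
    have hj : j < h.length := by omega
    rw [pvAppend_getD_lt h v j hj, pvAppend_getD_lt h v 0 hne]
    exact hdom j hj
  obtain ⟨h1, h2⟩ := pvBubbleUp_root (h ++ [v]) h.length hi hdom'
  refine ⟨?_, ?_, ?_⟩
  · rw [pvInsert, h1, pvAppend_getD_last, pvAppend_getD_lt h v 0 hne]
  · rw [pvInsert, pvBubbleUp_length]; omega
  · intro j hjl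
    rw [pvInsert, pvBubbleUp_length] at hjl
    exact h2 j hjl

-- A's fold, from any heap whose root dominates it, appends the running maxima
lemma pvFoldA (l : List Int) : ∀ (h acc : List Int), 0 < h.length →
    (∀ j, j < h.length → h.getD j 0 ≤ h.getD 0 0) →
    (l.foldl pvStep (h, acc)).2 = acc ++ pvScan (h.getD 0 0) l := by
  induction l with
  | nil => intro h acc _ _; simp [pvScan]
  | cons y ys ih =>
    intro h acc hne hdom
    obtain ⟨h1, h2, h3⟩ := pvInsert_spec h y hne hdom
    have : pvStep (h, acc) y = (pvInsert h y, acc ++ [(pvInsert h y).getD 0 0]) := rfl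
    rw [List.foldl_cons, this, ih _ _ h2 h3, h1, pvScan]
    simp

lemma pvInsert_nil (v : Int) : pvInsert [] v = [v] := by
  rw [pvInsert, pvBubbleUp]
  simp

lemma stream_max_eq_scan (x : Int) (xs : List Int) :
    stream_max (x :: xs) = x :: pvScan x xs := by
  rw [stream_max, List.foldl_cons]
  have h1 : pvStep ([], []) x = ([x], [x]) := by
    show (pvInsert [] x, [] ++ [(pvInsert [] x).getD 0 0]) = ([x], [x])
    rw [pvInsert_nil]; rfl
  have hdom1 : ∀ j, j < ([x] : List Int).length → ([x] : List Int).getD j 0 ≤ ([x] : List Int).getD 0 0 := by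
    intro j hj
    simp only [List.length_cons, List.length_nil] at hj
    have hj0 : j = 0 := by omega
    simp [hj0]
  rw [h1, pvFoldA xs [x] [x] (by simp) hdom1]
  simp

-- B's generic inner fold
def pvG (m : Int) (l : List Int) : Int :=
  l.foldl (fun b y => if y > b then y else b) m

lemma pvG_cons (m y : Int) (ys : List Int) :
    pvG m (y :: ys) = pvG (max m y) ys := by
  have : (if y > m then y else m) = max m y := by
    rw [max_def]; split_ifs <;> omega
  simp [pvG, this]

-- B's inner loop over indices 1..i equals the fold over the taken prefix of xs
lemma pvInner_eq (x : Int) (xs : List Int) (i : Nat) (hi : i ≤ xs.length) :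
    (List.range' 1 i).foldl
      (fun best j => if (x :: xs).getD j 0 > best then (x :: xs).getD j 0 else best) x
      = pvG x (xs.take i) := by
  induction i with
  | zero => simp [pvG]
  | succ n ih =>
    have hn : n < xs.length := by omega
    rw [List.range'_1_concat, List.foldl_append]
    rw [ih (by omega)]
    have hget : (x :: xs)[1 + n]?.getD 0 = xs[n]?.getD 0 := by
      have h1n : 1 + n = n + 1 := by omega
      rw [h1n]
      simp
    have htake : xs.take (n + 1) = xs.take n ++ [xs.getD n 0] := by
      rw [List.take_add_one]
      congr 1
      simp [List.getD_eq_getElem?_getD, List.getElem?_eq_getElem hn]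
    rw [htake]
    simp [pvG, List.foldl_append, hget]

lemma pvMapRange_eq_scan (xs : List Int) : ∀ (m : Int),
    (List.range (xs.length + 1)).map (fun i => pvG m (xs.take i)) = m :: pvScan m xs := by
  induction xs with
  | nil => intro m; simp [pvScan, pvG]
  | cons y ys ih =>
    intro m
    rw [List.length_cons, List.range_succ_eq_map, List.map_cons, List.map_map]
    have hcomp : ((fun i => pvG m ((y :: ys).take i)) ∘ Nat.succ)
        = fun i => pvG (max m y) (ys.take i) := by
      funext i
      simp only [Function.comp, List.take_succ_cons, pvG_cons]
    rw [hcomp, ih (max m y)]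
    simp [pvG, pvScan]

lemma stream_max_alt_eq_scan (x : Int) (xs : List Int) :
    stream_max_alt (x :: xs) = x :: pvScan x xs := by
  rw [stream_max_alt, List.length_cons]
  have : ∀ i ∈ List.range (xs.length + 1),
      (List.range' 1 i).foldl
        (fun best j => if (x :: xs).getD j 0 > best then (x :: xs).getD j 0 else best)
        ((x :: xs).getD 0 0)
      = pvG x (xs.take i) := by
    intro i hi
    rw [List.mem_range] at hi
    exact pvInner_eq x xs i (by omega)
  rw [List.map_congr_left this, pvMapRange_eq_scan]

-- ===== VERDICT (by name: the statement is the Claim_ definition above) =====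
theorem stream_max_spec : Claim_equal_stream_max := by
  intro nums _
  unfold Spec_stream_max
  cases nums with
  | nil => rfl
  | cons x xs => rw [stream_max_eq_scan, stream_max_alt_eq_scan]
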